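-- pv_equiv track=rewrite | github.com/samcgibson/SI206-Final-Project | MLB_API.py | create_team_ids
-- ===== SOURCE A (Python) =====
-- def create_team_ids(game_tuples_list):
--
--     team_id_dict = {}
--     id = 1001
--     for game_tup in game_tuples_list:
--         if game_tup[1] not in team_id_dict:
--             team_id_dict[game_tup[1]] = id
--             id += 1
--
--     return team_id_dict
-- ===== SOURCE B (Python) =====
-- def create_team_ids(game_tuples_list):
--     names = [g[1] for g in game_tuples_list]
--     return {name: 1001 + len(set(names[:names.index(name)])) for name in names}
-- ===== Notes on version B (the rewrite author's own statement) =====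
-- stated objective: alternative
-- what changed: Replaces the sequential id counter threaded through a membership-guarded loop by a per-name closed form: each name's id is computed independently as 1001 plus the number of distinct names strictly before its first occurrence (set of a prefix slice), assembled by a dict comprehension with no accumulator state.
import Mathlib
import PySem

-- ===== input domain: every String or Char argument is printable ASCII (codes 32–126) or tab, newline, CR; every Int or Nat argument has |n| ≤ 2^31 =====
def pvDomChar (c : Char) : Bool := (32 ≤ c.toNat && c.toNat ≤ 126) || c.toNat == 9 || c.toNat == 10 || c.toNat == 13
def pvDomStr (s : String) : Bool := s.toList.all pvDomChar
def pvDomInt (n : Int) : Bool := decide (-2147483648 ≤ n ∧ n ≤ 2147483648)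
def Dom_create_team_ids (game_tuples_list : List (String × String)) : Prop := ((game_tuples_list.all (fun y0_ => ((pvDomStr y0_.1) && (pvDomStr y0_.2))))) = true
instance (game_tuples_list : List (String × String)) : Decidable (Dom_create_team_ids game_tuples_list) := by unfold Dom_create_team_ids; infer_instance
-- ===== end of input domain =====

-- B drops A's sequential id counter: each name's id is a per-name closed form
-- (1001 + number of distinct names before its first occurrence), no accumulator state.

-- ===== PORT A =====
-- the loop: a dict plus a running id counter, insert on first sight
def create_team_ids (game_tuples_list : List (String × String)) : List (String × Int) :=
  (game_tuples_list.foldl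
    (fun (st : PySem.Dict String Int × Int) game_tup =>
      if st.1.contains game_tup.2 then st else (st.1.insert game_tup.2 st.2, st.2 + 1))
    (PySem.Dict.empty, 1001)).1.items

-- ===== PORT B =====
-- names = [g[1] for g in ...]; {name: 1001 + len(set(names[:names.index(name)])) for name in names}.
-- names.index(name) always succeeds here (name is drawn from names), so '.getD 0' is never hit.
def create_team_ids_alt (game_tuples_list : List (String × String)) : List (String × Int) :=
  let names := game_tuples_list.map (fun g => g.2)
  (names.foldl
    (fun (d : PySem.Dict String Int) name =>
      d.insert name
        (1001 + ((PySem.Set.ofList (names.take ((PySem.List.index? names name).getD 0))).length : Int)))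
    PySem.Dict.empty).items

-- ===== PRECONDITION & SPEC =====
def Spec_create_team_ids (game_tuples_list : List (String × String)) (out : List (String × Int)) : Prop := out = create_team_ids_alt game_tuples_list
instance (game_tuples_list : List (String × String)) (out : List (String × Int)) : Decidable (Spec_create_team_ids game_tuples_list out) := by unfold Spec_create_team_ids; infer_instance

-- ===== CLAIM (what is proved, stated in full; the proofs are below) =====
def Claim_equal_create_team_ids : Prop := ∀ (game_tuples_list : List (String × String)), Dom_create_team_ids game_tuples_list → Spec_create_team_ids game_tuples_list (create_team_ids game_tuples_list)

-- ===== LEMMAS AND PROOFS =====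

-- the new (name, id) pairs A's loop appends, given the keys already seen and the next id
def pvNewPart (seen : List String) (n : Int) : List (String × String) → List (String × Int)
  | [] => []
  | g :: l => if g.2 ∈ seen then pvNewPart seen n l
              else (g.2, n) :: pvNewPart (seen ++ [g.2]) (n + 1) l

-- the new keys, in first-occurrence order
def pvNewKeys (seen : List String) : List String → List String
  | [] => []
  | x :: xs => if x ∈ seen then pvNewKeys seen xs
               else x :: pvNewKeys (seen ++ [x]) xs

theorem pv_A_inv (l : List (String × String)) :
    ∀ (d : PySem.Dict String Int) (n : Int), d.keys.Nodup →
    (l.foldl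
      (fun (st : PySem.Dict String Int × Int) g =>
        if st.1.contains g.2 then st else (st.1.insert g.2 st.2, st.2 + 1))
      (d, n)).1.items = d.items ++ pvNewPart d.keys n l := by
  induction l with
  | nil => intro d n _; simp [pvNewPart]
  | cons g l ih =>
    intro d n hnd
    simp only [List.foldl_cons, pvNewPart]
    rw [PySem.Dict.contains_eq_decide_mem_keys]
    by_cases hm : g.2 ∈ d.keys
    · simp only [hm, decide_true, if_true, ih d n hnd]
    · simp only [hm, decide_false, Bool.false_eq_true, if_false]
      have hc : d.contains g.2 = false := by
        rw [PySem.Dict.contains_eq_decide_mem_keys]; simp [hm]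
      have hk : (d.insert g.2 n).keys = d.keys ++ [g.2] :=
        PySem.Dict.keys_insert_of_not_contains d n hc
      have hnd' : (d.insert g.2 n).keys.Nodup := by
        rw [hk]
        simp only [List.nodup_append, List.nodup_singleton, hnd, true_and]
        intro a ha b hb heq
        rw [List.mem_singleton] at hb
        exact hm (hb ▸ heq ▸ ha)
      rw [ih (d.insert g.2 n) (n + 1) hnd',
          PySem.Dict.items_insert_of_not_contains d n hc, hk]
      simp

-- B's fold over names: duplicate keys re-insert the SAME pair, so items grow by the new keys only
theorem pv_B_fold (v : String → Int) (xs : List String) :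
    ∀ (seen : List String), seen.Nodup →
    (xs.foldl (fun (d : PySem.Dict String Int) x => d.insert x (v x))
        (PySem.Dict.mk (seen.map (fun k => (k, v k))))).items
      = (seen ++ pvNewKeys seen xs).map (fun k => (k, v k)) := by
  induction xs with
  | nil => intro seen _; simp [pvNewKeys]
  | cons x xs ih =>
    intro seen hnd
    simp only [List.foldl_cons, pvNewKeys]
    by_cases hm : x ∈ seen
    · have hc : (PySem.Dict.mk (seen.map (fun k => (k, v k)))).contains x = true := by
        rw [PySem.Dict.contains_eq_decide_mem_keys]
        simp [PySem.Dict.keys, hm]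
      have hinsert : (PySem.Dict.mk (seen.map (fun k => (k, v k)))).insert x (v x)
          = PySem.Dict.mk (seen.map (fun k => (k, v k))) := by
        apply PySem.Dict.ext
        rw [PySem.Dict.items_insert_of_contains _ _ hc]
        show (seen.map (fun k => (k, v k))).map _ = _
        rw [List.map_map]
        refine List.map_congr_left fun k _ => ?_
        simp only [Function.comp_apply]
        by_cases hk : k = x
        · subst hk; simp
        · simp [hk]
      rw [hinsert, ih seen hnd]
      simp [hm]
    · have hc : (PySem.Dict.mk (seen.map (fun k => (k, v k)))).contains x = false := by
        rw [PySem.Dict.contains_eq_decide_mem_keys]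
        simp [PySem.Dict.keys, hm]
      have hinsert : (PySem.Dict.mk (seen.map (fun k => (k, v k)))).insert x (v x)
          = PySem.Dict.mk ((seen ++ [x]).map (fun k => (k, v k))) := by
        apply PySem.Dict.ext
        rw [PySem.Dict.items_insert_of_not_contains _ _ hc]
        simp
      have hnd' : (seen ++ [x]).Nodup := by
        simp only [List.nodup_append, List.nodup_singleton, hnd, true_and]
        intro a ha b hb heq
        rw [List.mem_singleton] at hb
        exact hm (hb ▸ heq ▸ ha)
      rw [hinsert, ih (seen ++ [x]) hnd']
      simp [hm]

-- A's (key, id) pairs ARE B's closed form: when key x first appears after prefix 'pre',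
-- names.index(x) = |pre| and set(names[:|pre|]) = the keys seen so far, whose size drives A's counter.
theorem pv_main (names : List String) (l : List (String × String)) :
    ∀ (pre : List (String × String)), names = pre.map (fun g => g.2) ++ l.map (fun g => g.2) →
    pvNewPart (PySem.Set.ofList (pre.map (fun g => g.2)))
        (1001 + ((PySem.Set.ofList (pre.map (fun g => g.2))).length : Int)) l
      = (pvNewKeys (PySem.Set.ofList (pre.map (fun g => g.2))) (l.map (fun g => g.2))).map
          (fun k => (k, 1001 + ((PySem.Set.ofList (names.take ((PySem.List.index? names k).getD 0))).length : Int))) := by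
  induction l with
  | nil => intro pre _; simp [pvNewPart, pvNewKeys]
  | cons g l ih =>
    intro pre hnames
    simp only [List.map_cons, pvNewPart, pvNewKeys]
    have hpre' : (pre ++ [g]).map (fun g => g.2) = pre.map (fun g => g.2) ++ [g.2] := by simp
    by_cases hm : g.2 ∈ PySem.Set.ofList (pre.map (fun g => g.2))
    · simp only [hm, if_true]
      have hset : PySem.Set.ofList ((pre ++ [g]).map (fun g => g.2))
          = PySem.Set.ofList (pre.map (fun g => g.2)) := by
        rw [hpre', PySem.Set.ofList_append_singleton, PySem.Set.add_of_mem hm]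
      have := ih (pre ++ [g]) (by rw [hpre']; simpa using hnames)
      rw [hset] at this
      exact this
    · simp only [hm, if_false]
      have hset : PySem.Set.ofList ((pre ++ [g]).map (fun g => g.2))
          = PySem.Set.ofList (pre.map (fun g => g.2)) ++ [g.2] := by
        rw [hpre', PySem.Set.ofList_append_singleton, PySem.Set.add_of_not_mem hm]
      have hrec := ih (pre ++ [g]) (by rw [hpre']; simpa using hnames)
      rw [hset] at hrec
      -- head pair: index? names g.2 = |pre|, take gives the prefix, ofList gives 'seen'
      have hnotpre : g.2 ∉ pre.map (fun g => g.2) := fun h => hm ((PySem.Set.mem_ofList _ _).mpr h)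
      have hidx : PySem.List.index? names g.2 = some (pre.map (fun g => g.2)).length := by
        rw [hnames]
        rw [show pre.map (fun g => g.2) ++ (g :: l).map (fun g => g.2)
              = (pre.map (fun g => g.2) ++ [g.2]) ++ l.map (fun g => g.2) by simp]
        rw [PySem.List.index?_append_of_mem _ (by simp),
            PySem.List.index?_append_singleton_self _ _ hnotpre]
      have htake : names.take (pre.map (fun g => g.2)).length = pre.map (fun g => g.2) := by
        rw [hnames, List.take_left]
      have hlen : (1001 : Int) + ((PySem.Set.ofList (pre.map (fun g => g.2))).length : Int) + 1
          = 1001 + (((PySem.Set.ofList (pre.map (fun g => g.2)) ++ [g.2]).length : Int)) := by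
        push_cast [List.length_append, List.length_singleton]; ring
      rw [List.map_cons, hlen, hrec]
      congr 1
      rw [hidx, Option.getD_some, htake]

-- ===== VERDICT (by name: the statement is the Claim_ definition above) =====
theorem create_team_ids_spec : Claim_equal_create_team_ids := by
  intro l _
  unfold Spec_create_team_ids create_team_ids create_team_ids_alt
  rw [pv_A_inv l PySem.Dict.empty 1001 (by exact List.nodup_nil)]
  have hB := pv_B_fold
    (fun name => 1001 + ((PySem.Set.ofList ((l.map (fun g => g.2)).take
        ((PySem.List.index? (l.map (fun g => g.2)) name).getD 0))).length : Int))
    (l.map (fun g => g.2)) [] List.nodup_nil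
  simp only [List.map_nil, List.nil_append] at hB
  rw [show (PySem.Dict.mk ([] : List (String × Int))) = PySem.Dict.empty from rfl] at hB
  rw [hB]
  have hM := pv_main (l.map (fun g => g.2)) l [] (by simp)
  simp only [List.map_nil, PySem.Set.ofList] at hM ⊢
  rw [show ((PySem.Dict.empty : PySem.Dict String Int).items) = [] from rfl,
      List.nil_append]
  convert hM using 2
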